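-- pv_equiv track=rewrite | github.com/SimeonChifligarov/Alpha_Judge_Softuni | Python_Fundamentals/Python_Fundamentals/01_02_Basic_Syntax_Conditional_Statements_and_Loops_Exercise/12_Christmas_Spirit_v2.py | calculate_christmas_expenses
-- ===== SOURCE A (Python) =====
-- def calculate_christmas_expenses(quantity, days):
--     ornament_price, ornament_points = 2, 5
--     skirt_price, skirt_points = 5, 3
--     garland_price, garland_points = 3, 10
--     lights_price, lights_points = 15, 17
--
--     total_cost = 0
--     total_spirit = 0
--
--     for day in range(1, days + 1):
--         if day % 11 == 0:
--             quantity += 2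
--
--         if day % 2 == 0:
--             total_cost += quantity * ornament_price
--             total_spirit += ornament_points
--
--         if day % 3 == 0:
--             total_cost += quantity * skirt_price
--             total_cost += quantity * garland_price
--             total_spirit += skirt_points + garland_points
--
--         if day % 5 == 0:
--             total_cost += quantity * lights_price
--             total_spirit += lights_points
--             if day % 3 == 0:
--                 total_spirit += 30
--
--         if day % 10 == 0:
--             total_spirit -= 20
--             total_cost += skirt_price + garland_price + lights_price
--             if day == days:
--                 total_spirit -= 30
--
--     return total_cost, total_spirit
-- ===== SOURCE B (Python) =====
-- def calculate_christmas_expenses(quantity, days):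
--     # Closed-form: quantity on day d is quantity + 2*(d//11); sum each
--     # divisibility class (2, 3, 5, 10) arithmetically instead of looping.
--     n = days if days > 0 else 0
--
--     def floorsum(t):
--         # sum of (j*t)//11 for j = 1..n//t, via t*m*(m+1)/2 = 11*S + residues
--         m = n // t
--         q, r = divmod(m, 11)
--         p = sum(j * t % 11 for j in range(1, r + 1))
--         return (t * m * (m + 1) // 2 - (55 * q + p)) // 11
--
--     n2, n3, n5, n10, n15 = n // 2, n // 3, n // 5, n // 10, n // 15
--     cost = (2 * (quantity * n2 + 2 * floorsum(2))
--             + 8 * (quantity * n3 + 2 * floorsum(3))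
--             + 15 * (quantity * n5 + 2 * floorsum(5))
--             + 23 * n10)
--     spirit = (5 * n2 + 13 * n3 + 17 * n5 + 30 * n15 - 20 * n10
--               - (30 if n10 > 0 and days % 10 == 0 else 0))
--     return cost, spirit
-- ===== Notes on version B (the rewrite author's own statement) =====
-- stated objective: faster
-- what changed: Replaces the day-by-day simulation loop with closed-form arithmetic: counts of multiples and arithmetic-progression floor sums per divisibility class (2,3,5,10), computed in O(1).
import Mathlib
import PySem

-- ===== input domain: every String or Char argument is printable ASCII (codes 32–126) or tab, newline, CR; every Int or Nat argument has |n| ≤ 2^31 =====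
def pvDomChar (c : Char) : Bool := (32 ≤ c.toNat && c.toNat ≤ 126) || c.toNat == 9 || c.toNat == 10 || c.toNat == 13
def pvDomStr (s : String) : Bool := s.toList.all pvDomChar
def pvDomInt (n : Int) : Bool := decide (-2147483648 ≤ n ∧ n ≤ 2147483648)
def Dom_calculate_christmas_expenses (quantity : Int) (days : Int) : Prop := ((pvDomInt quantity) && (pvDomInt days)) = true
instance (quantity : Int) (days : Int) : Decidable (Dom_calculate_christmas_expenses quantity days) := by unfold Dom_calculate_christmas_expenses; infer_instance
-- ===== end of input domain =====

-- B replaces A's day-by-day loop with closed-form per-divisibility-class sums (O(1) instead of O(days)).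

-- ===== PORT A =====
-- one loop iteration of A (day-by-day state update: quantity, cost, spirit)
def pvStepA (D : Int) (st : Int × Int × Int) (day : Int) : Int × Int × Int :=
  let q1 := if PySem.Int.mod day 11 = 0 then st.1 + 2 else st.1
  let c2 := if PySem.Int.mod day 2 = 0 then st.2.1 + q1 * 2 else st.2.1
  let s2 := if PySem.Int.mod day 2 = 0 then st.2.2 + 5 else st.2.2
  let c3 := if PySem.Int.mod day 3 = 0 then c2 + q1 * 5 + q1 * 3 else c2
  let s3 := if PySem.Int.mod day 3 = 0 then s2 + (3 + 10) else s2
  let c5 := if PySem.Int.mod day 5 = 0 then c3 + q1 * 15 else c3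
  let s5 := if PySem.Int.mod day 5 = 0 then
      s3 + 17 + (if PySem.Int.mod day 3 = 0 then 30 else 0) else s3
  let c10 := if PySem.Int.mod day 10 = 0 then c5 + (5 + 3 + 15) else c5
  let s10 := if PySem.Int.mod day 10 = 0 then
      s5 - 20 - (if day = D then 30 else 0) else s5
  (q1, c10, s10)

def calculate_christmas_expenses (quantity : Int) (days : Int) : List Int :=
  let res := (PySem.List.pyRange 1 (days + 1)).foldl (pvStepA days) (quantity, 0, 0)
  [res.2.1, res.2.2]

-- ===== PORT B =====
-- sum of j*t % 11 for j = 1..r  (the partial-period residue sum in Source B)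
def pv_psum (t r : Int) : Int :=
  (PySem.List.pyRange 1 (r + 1)).foldl (fun a j => a + PySem.Int.mod (j * t) 11) 0

-- Source B's floorsum: sum of (j*t)//11 for j = 1..n//t via the AP formula minus residues
def pv_floorsum (n t : Int) : Int :=
  let m := PySem.Int.floordiv n t
  let q := PySem.Int.floordiv m 11
  let r := PySem.Int.mod m 11
  PySem.Int.floordiv (PySem.Int.floordiv (t * m * (m + 1)) 2 - (55 * q + pv_psum t r)) 11

def calculate_christmas_expenses_alt (quantity : Int) (days : Int) : List Int :=
  let n := if days > 0 then days else 0
  let n2 := PySem.Int.floordiv n 2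
  let n3 := PySem.Int.floordiv n 3
  let n5 := PySem.Int.floordiv n 5
  let n10 := PySem.Int.floordiv n 10
  let n15 := PySem.Int.floordiv n 15
  let cost := 2 * (quantity * n2 + 2 * pv_floorsum n 2)
      + 8 * (quantity * n3 + 2 * pv_floorsum n 3)
      + 15 * (quantity * n5 + 2 * pv_floorsum n 5)
      + 23 * n10
  let spirit := 5 * n2 + 13 * n3 + 17 * n5 + 30 * n15 - 20 * n10
      - (if n10 > 0 ∧ PySem.Int.mod days 10 = 0 then 30 else 0)
  [cost, spirit]

-- ===== PRECONDITION & SPEC =====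
def Spec_calculate_christmas_expenses (quantity : Int) (days : Int) (out : List Int) : Prop := out = calculate_christmas_expenses_alt quantity days
instance (quantity : Int) (days : Int) (out : List Int) : Decidable (Spec_calculate_christmas_expenses quantity days out) := by unfold Spec_calculate_christmas_expenses; infer_instance

-- ===== CLAIM (what is proved, stated in full; the proofs are below) =====
def Claim_equal_calculate_christmas_expenses : Prop := ∀ (quantity : Int) (days : Int), Dom_calculate_christmas_expenses quantity days → Spec_calculate_christmas_expenses quantity days (calculate_christmas_expenses quantity days)

-- ===== LEMMAS AND PROOFS =====

-- recursive reference value: pvF t m = sum of (j*t)//11 for j = 1..m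
def pvF (t : Int) : Nat → Int
  | 0 => 0
  | m + 1 => pvF t m + ((m : Int) + 1) * t / 11

-- closed-form loop state after n days
def pvQ (q : Int) (n : Nat) : Int := q + 2 * ((n / 11 : Nat) : Int)
def pvC (q : Int) (n : Nat) : Int :=
  2 * (q * ((n / 2 : Nat) : Int) + 2 * pvF 2 (n / 2))
  + 8 * (q * ((n / 3 : Nat) : Int) + 2 * pvF 3 (n / 3))
  + 15 * (q * ((n / 5 : Nat) : Int) + 2 * pvF 5 (n / 5))
  + 23 * ((n / 10 : Nat) : Int)
def pvS0 (n : Nat) : Int :=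
  5 * ((n / 2 : Nat) : Int) + 13 * ((n / 3 : Nat) : Int) + 17 * ((n / 5 : Nat) : Int)
  + 30 * ((n / 15 : Nat) : Int) - 20 * ((n / 10 : Nat) : Int)

lemma pv_psum_succ (t r : Int) (hr : 0 ≤ r) :
    pv_psum t (r + 1) = pv_psum t r + (r + 1) * t % 11 := by
  unfold pv_psum
  rw [PySem.List.pyRange_one_succ_right (by omega), List.foldl_append]
  simp

lemma pv_psum_zero (t : Int) : pv_psum t 0 = 0 := by
  unfold pv_psum
  rw [show PySem.List.pyRange 1 (0 + 1) = [] from by simp [PySem.List.pyRange]]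
  rfl

-- residue-sum step: R(m+1) = R(m) + ((m+1)*t) % 11
lemma pvR_succ (t : Int) (h55 : pv_psum t 10 = 55) (m : Nat) :
    55 * (((m : Int) + 1) / 11) + pv_psum t (((m : Int) + 1) % 11)
      = 55 * ((m : Int) / 11) + pv_psum t ((m : Int) % 11) + ((m : Int) + 1) * t % 11 := by
  by_cases h : (m : Int) % 11 = 10
  · have e1 : ((m : Int) + 1) % 11 = 0 := by omega
    have e2 : ((m : Int) + 1) / 11 = (m : Int) / 11 + 1 := by omega
    have e3 : ((m : Int) + 1) * t % 11 = 0 := by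
      rw [Int.mul_emod, e1]; simp
    rw [e1, e2, e3, h, pv_psum_zero, h55]; ring
  · have hr0 : 0 ≤ (m : Int) % 11 := by omega
    have e1 : ((m : Int) + 1) % 11 = (m : Int) % 11 + 1 := by omega
    have e2 : ((m : Int) + 1) / 11 = (m : Int) / 11 := by omega
    have e3 : ((m : Int) + 1) * t % 11 = ((m : Int) % 11 + 1) * t % 11 := by
      rw [Int.mul_emod, show ((m : Int) + 1) % 11 = ((m : Int) % 11 + 1) % 11 from by omega,
        ← Int.mul_emod]
    rw [e1, e2, e3, pv_psum_succ t _ hr0]; ring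

-- the AP numerator identity: t*m*(m+1)/2 = 11*pvF t m + R(m)
lemma pv_formula (t : Int) (h55 : pv_psum t 10 = 55) (m : Nat) :
    t * (m : Int) * ((m : Int) + 1) / 2
      = 11 * pvF t m + (55 * ((m : Int) / 11) + pv_psum t ((m : Int) % 11)) := by
  induction m with
  | zero => simp [pvF, pv_psum_zero]
  | succ m ih =>
    have key : t * ((m : Int) + 1) * (((m : Int) + 1) + 1)
        = t * (m : Int) * ((m : Int) + 1) + (t * ((m : Int) + 1)) * 2 := by ring
    have hdiv : t * ((m : Int) + 1) * (((m : Int) + 1) + 1) / 2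
        = t * (m : Int) * ((m : Int) + 1) / 2 + t * ((m : Int) + 1) := by
      rw [key, Int.add_mul_ediv_right _ _ (by norm_num : (2:Int) ≠ 0)]
    have hsplit := Int.mul_ediv_add_emod (((m : Int) + 1) * t) 11
    have hF : pvF t (m + 1) = pvF t m + ((m : Int) + 1) * t / 11 := by simp [pvF]
    push_cast
    rw [hdiv, hF, pvR_succ t h55 m, ih]
    push_cast
    linarith

lemma pv_psum2 : pv_psum 2 10 = 55 := by decide
lemma pv_psum3 : pv_psum 3 10 = 55 := by decide
lemma pv_psum5 : pv_psum 5 10 = 55 := by decide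

-- characterization of Source B's floorsum
lemma pv_floorsum_char (tn : Nat) (htn : 0 < tn) (h55 : pv_psum (tn : Int) 10 = 55) (n : Nat) :
    pv_floorsum (n : Int) (tn : Int) = pvF (tn : Int) (n / tn) := by
  show PySem.Int.floordiv (PySem.Int.floordiv ((tn:Int) * PySem.Int.floordiv (n:Int) (tn:Int) * (PySem.Int.floordiv (n:Int) (tn:Int) + 1)) 2 - (55 * PySem.Int.floordiv (PySem.Int.floordiv (n:Int) (tn:Int)) 11 + pv_psum (tn:Int) (PySem.Int.mod (PySem.Int.floordiv (n:Int) (tn:Int)) 11))) 11 = pvF (tn:Int) (n / tn)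
  rw [PySem.Int.floordiv_natCast n tn]
  rw [PySem.Int.floordiv_eq_ediv_of_pos (by norm_num : (0:Int) < 2),
      PySem.Int.floordiv_eq_ediv_of_pos (by norm_num : (0:Int) < 11),
      PySem.Int.floordiv_eq_ediv_of_pos (by norm_num : (0:Int) < 11),
      PySem.Int.mod_eq_emod_of_pos (by norm_num : (0:Int) < 11)]
  rw [pv_formula (tn : Int) h55 (n / tn)]
  ring_nf
  exact Int.mul_ediv_cancel _ (by norm_num)

-- step lemma for pvF along Nat division
lemma pvF_div_succ (tn : Nat) (htn : 0 < tn) (n : Nat) :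
    pvF (tn : Int) ((n + 1) / tn)
      = pvF (tn : Int) (n / tn)
        + (if ((n : Int) + 1) % (tn : Int) = 0 then ((n : Int) + 1) / 11 else 0) := by
  have hcast : ((n : Int) + 1) % (tn : Int) = (((n + 1) % tn : Nat) : Int) := by
    push_cast
    rfl
  by_cases h : (n + 1) % tn = 0
  · have hdvd : tn ∣ n + 1 := Nat.dvd_of_mod_eq_zero h
    have h1 : (n + 1) / tn = n / tn + 1 := by
      rw [Nat.succ_div, if_pos hdvd]
    have hNat : (n / tn + 1) * tn = n + 1 := by
      rw [← h1]; exact Nat.div_mul_cancel hdvd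
    have hInt : ((n : Int) + 1) % (tn : Int) = 0 := by rw [hcast, h]; rfl
    have hprod : (((n / tn : Nat) : Int) + 1) * (tn : Int) = (n : Int) + 1 := by
      exact_mod_cast congrArg (Nat.cast : Nat → Int) hNat
    rw [h1, if_pos hInt]
    simp only [pvF]
    rw [hprod]
  · have h1 : (n + 1) / tn = n / tn := by
      rw [Nat.succ_div, if_neg (fun hd => h (Nat.mod_eq_zero_of_dvd hd))]
      omega
    have hInt : ¬ ((n : Int) + 1) % (tn : Int) = 0 := by
      rw [hcast]
      exact_mod_cast fun hc => h (by exact_mod_cast hc)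
    rw [h1, if_neg hInt]
    ring

-- cast/step facts for the Nat divisions in the closed forms
lemma pvH2 (n : Nat) : ((((n + 1) / 2 : Nat)) : Int) = ((n / 2 : Nat) : Int) + (if ((n : Int) + 1) % 2 = 0 then 1 else 0) := by split_ifs <;> omega
lemma pvH3 (n : Nat) : ((((n + 1) / 3 : Nat)) : Int) = ((n / 3 : Nat) : Int) + (if ((n : Int) + 1) % 3 = 0 then 1 else 0) := by split_ifs <;> omega
lemma pvH5 (n : Nat) : ((((n + 1) / 5 : Nat)) : Int) = ((n / 5 : Nat) : Int) + (if ((n : Int) + 1) % 5 = 0 then 1 else 0) := by split_ifs <;> omega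
lemma pvH10 (n : Nat) : ((((n + 1) / 10 : Nat)) : Int) = ((n / 10 : Nat) : Int) + (if ((n : Int) + 1) % 10 = 0 then 1 else 0) := by split_ifs <;> omega
lemma pvH11 (n : Nat) : ((((n + 1) / 11 : Nat)) : Int) = ((n : Int) + 1) / 11 := by omega
lemma pvH15 (n : Nat) : ((((n + 1) / 15 : Nat)) : Int) = ((n / 15 : Nat) : Int) + (if ((n : Int) + 1) % 5 = 0 then (if ((n : Int) + 1) % 3 = 0 then 1 else 0) else 0) := by
  have hc3 : ((n : Int) + 1) % 3 = (((n + 1) % 3 : Nat) : Int) := by push_cast; rfl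
  have hc5 : ((n : Int) + 1) % 5 = (((n + 1) % 5 : Nat) : Int) := by push_cast; rfl
  have e3 : (n + 1) % 15 % 3 = (n + 1) % 3 := Nat.mod_mod_of_dvd _ (by norm_num)
  have e5 : (n + 1) % 15 % 5 = (n + 1) % 5 := Nat.mod_mod_of_dvd _ (by norm_num)
  rw [hc3, hc5]
  simp only [Nat.cast_eq_zero]
  split_ifs with h5 h3
  · have h1 : (n + 1) / 15 = n / 15 + 1 := by
      have h15 : (n + 1) % 15 = 0 := by omega
      omega
    rw [h1]; push_cast; ring
  · have h15 : (n + 1) % 15 ≠ 0 := fun h => h3 (by rw [← e3, h])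
    have h1 : (n + 1) / 15 = n / 15 := by omega
    rw [h1]; push_cast; ring
  · have h15 : (n + 1) % 15 ≠ 0 := fun h => h5 (by rw [← e5, h])
    have h1 : (n + 1) / 15 = n / 15 := by omega
    rw [h1]; push_cast; ring

-- closed-form step equalities for quantity, cost, spirit
lemma pvQ_succ (q : Int) (n : Nat) :
    (if ((n : Int) + 1) % 11 = 0 then pvQ q n + 2 else pvQ q n) = pvQ q (n + 1) := by
  unfold pvQ; split_ifs <;> push_cast <;> omega

set_option maxHeartbeats 1600000 in
lemma pvC_succ (q : Int) (n : Nat) :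
    pvC q (n + 1) = pvC q n
      + (if ((n : Int) + 1) % 2 = 0 then pvQ q (n + 1) * 2 else 0)
      + (if ((n : Int) + 1) % 3 = 0 then pvQ q (n + 1) * 5 + pvQ q (n + 1) * 3 else 0)
      + (if ((n : Int) + 1) % 5 = 0 then pvQ q (n + 1) * 15 else 0)
      + (if ((n : Int) + 1) % 10 = 0 then 23 else 0) := by
  have p2 := pvF_div_succ 2 (by norm_num) n
  have p3 := pvF_div_succ 3 (by norm_num) n
  have p5 := pvF_div_succ 5 (by norm_num) n
  simp only [Nat.cast_ofNat] at p2 p3 p5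
  unfold pvC pvQ
  rw [p2, p3, p5, pvH2, pvH3, pvH5, pvH10, pvH11]
  rw [show (if ((n : Int) + 1) % 2 = 0 then ((n:Int)+1)/11 else 0) = (if ((n : Int) + 1) % 2 = 0 then (1:Int) else 0) * (((n:Int)+1)/11) from by split_ifs <;> ring]
  rw [show (if ((n : Int) + 1) % 3 = 0 then ((n:Int)+1)/11 else 0) = (if ((n : Int) + 1) % 3 = 0 then (1:Int) else 0) * (((n:Int)+1)/11) from by split_ifs <;> ring]
  rw [show (if ((n : Int) + 1) % 5 = 0 then ((n:Int)+1)/11 else 0) = (if ((n : Int) + 1) % 5 = 0 then (1:Int) else 0) * (((n:Int)+1)/11) from by split_ifs <;> ring]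
  rw [show (if ((n : Int) + 1) % 2 = 0 then (q + 2 * (((n:Int)+1)/11)) * 2 else 0) = (if ((n : Int) + 1) % 2 = 0 then (1:Int) else 0) * ((q + 2 * (((n:Int)+1)/11)) * 2) from by split_ifs <;> ring]
  rw [show (if ((n : Int) + 1) % 3 = 0 then (q + 2 * (((n:Int)+1)/11)) * 5 + (q + 2 * (((n:Int)+1)/11)) * 3 else 0) = (if ((n : Int) + 1) % 3 = 0 then (1:Int) else 0) * ((q + 2 * (((n:Int)+1)/11)) * 5 + (q + 2 * (((n:Int)+1)/11)) * 3) from by split_ifs <;> ring]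
  rw [show (if ((n : Int) + 1) % 5 = 0 then (q + 2 * (((n:Int)+1)/11)) * 15 else 0) = (if ((n : Int) + 1) % 5 = 0 then (1:Int) else 0) * ((q + 2 * (((n:Int)+1)/11)) * 15) from by split_ifs <;> ring]
  rw [show (if ((n : Int) + 1) % 10 = 0 then (23:Int) else 0) = (if ((n : Int) + 1) % 10 = 0 then (1:Int) else 0) * 23 from by split_ifs <;> ring]
  ring

lemma pvS0_succ (n : Nat) :
    pvS0 (n + 1) = pvS0 n
      + (if ((n : Int) + 1) % 2 = 0 then 5 else 0)
      + (if ((n : Int) + 1) % 3 = 0 then 3 + 10 else 0)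
      + (if ((n : Int) + 1) % 5 = 0 then 17 + (if ((n : Int) + 1) % 3 = 0 then 30 else 0) else 0)
      - (if ((n : Int) + 1) % 10 = 0 then 20 else 0) := by
  unfold pvS0
  rw [pvH2, pvH3, pvH5, pvH10, pvH15]
  split_ifs <;> ring

-- one loop step of A, in closed form
set_option maxHeartbeats 1600000 in
lemma pvStepA_closed (D q : Int) (n : Nat) :
    pvStepA D (pvQ q n, pvC q n, pvS0 n) ((n : Int) + 1)
      = (pvQ q (n + 1), pvC q (n + 1),
         pvS0 (n + 1) - (if ((n : Int) + 1) % 10 = 0 ∧ (n : Int) + 1 = D then 30 else 0)) := by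
  simp only [pvStepA,
    PySem.Int.mod_eq_emod_of_pos (show (0:Int) < 11 by norm_num),
    PySem.Int.mod_eq_emod_of_pos (show (0:Int) < 2 by norm_num),
    PySem.Int.mod_eq_emod_of_pos (show (0:Int) < 3 by norm_num),
    PySem.Int.mod_eq_emod_of_pos (show (0:Int) < 5 by norm_num),
    PySem.Int.mod_eq_emod_of_pos (show (0:Int) < 10 by norm_num)]
  rw [pvQ_succ q n]
  rw [pvC_succ q n, pvS0_succ n]
  refine Prod.ext rfl (Prod.ext ?_ ?_) <;> simp only <;> split_ifs <;> first | ring1 | tauto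

-- the loop invariant over the prefix of the range (every day < D)
lemma pv_loop_inv (D q : Int) (n : Nat) (hn : (n : Int) < D) :
    (PySem.List.pyRange 1 ((n : Int) + 1)).foldl (pvStepA D) (q, 0, 0)
      = (pvQ q n, pvC q n, pvS0 n) := by
  induction n with
  | zero =>
    rw [show PySem.List.pyRange 1 ((0:Nat) + 1 : Int) = [] from by simp [PySem.List.pyRange]]
    simp [pvQ, pvC, pvS0, pvF]
  | succ m ih =>
    rw [show ((m + 1 : Nat) : Int) + 1 = ((m : Int) + 1) + 1 from by push_cast; ring]
    rw [PySem.List.pyRange_one_succ_right (by omega), List.foldl_append]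
    rw [ih (by push_cast at hn ⊢; omega)]
    simp only [List.foldl]
    rw [pvStepA_closed D q m]
    rw [if_neg (by push_cast at hn; omega)]
    push_cast
    ring_nf

-- closed form of B
lemma pvFS (tn : Nat) (htn : 0 < tn) (h55 : pv_psum (tn : Int) 10 = 55) (n : Nat) :
    pv_floorsum (n : Int) (tn : Int) = pvF (tn : Int) (n / tn) := pv_floorsum_char tn htn h55 n

lemma pv_alt_closed (q : Int) (n : Nat) :
    calculate_christmas_expenses_alt q (n : Int)
      = [pvC q n, pvS0 n - (if 10 ≤ n ∧ (n : Int) % 10 = 0 then 30 else 0)] := by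
  have h552 : pv_psum ((2:Nat) : Int) 10 = 55 := by norm_num [pv_psum2]
  have h553 : pv_psum ((3:Nat) : Int) 10 = 55 := by norm_num [pv_psum3]
  have h555 : pv_psum ((5:Nat) : Int) 10 = 55 := by norm_num [pv_psum5]
  have f2 := pvFS 2 (by norm_num) h552 n
  have f3 := pvFS 3 (by norm_num) h553 n
  have f5 := pvFS 5 (by norm_num) h555 n
  simp only [Nat.cast_ofNat] at f2 f3 f5
  have d2 := PySem.Int.floordiv_natCast n 2
  have d3 := PySem.Int.floordiv_natCast n 3
  have d5 := PySem.Int.floordiv_natCast n 5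
  have d10 := PySem.Int.floordiv_natCast n 10
  have d15 := PySem.Int.floordiv_natCast n 15
  have m10 := PySem.Int.mod_natCast n 10
  simp only [Nat.cast_ofNat] at d2 d3 d5 d10 d15 m10
  unfold calculate_christmas_expenses_alt
  have hn : (if (n : Int) > 0 then (n : Int) else 0) = (n : Int) := by split_ifs <;> omega
  simp only [hn]
  rw [f2, f3, f5, d2, d3, d5, d10, d15, m10]
  unfold pvC pvS0
  congr 1
  congr 1
  congr 1
  by_cases h : (n % 10 : Nat) = 0
  · by_cases h10 : 10 ≤ n
    · rw [if_pos ⟨by omega, by omega⟩, if_pos ⟨h10, by omega⟩]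
    · have hn0 : n = 0 := by omega
      subst hn0
      norm_num
  · rw [if_neg (by omega), if_neg (by omega)]

-- ===== VERDICT (by name: the statement is the Claim_ definition above) =====
theorem calculate_christmas_expenses_spec : Claim_equal_calculate_christmas_expenses := by
  intro q days _
  unfold Spec_calculate_christmas_expenses
  by_cases hpos : 1 ≤ days
  · -- days ≥ 1
    obtain ⟨m, rfl⟩ : ∃ m : Nat, days = ((m : Int) + 1) :=
      ⟨(days - 1).toNat, by omega⟩
    unfold calculate_christmas_expenses
    rw [PySem.List.pyRange_one_succ_right (by omega), List.foldl_append,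
        pv_loop_inv ((m : Int) + 1) q m (by omega)]
    simp only [List.foldl]
    rw [pvStepA_closed ((m : Int) + 1) q m]
    have hb := pv_alt_closed q (m + 1)
    simp only [Nat.cast_add, Nat.cast_one] at hb
    rw [hb]
    simp only
    congr 1
    congr 1
    congr 1
    by_cases h : ((m : Int) + 1) % 10 = 0
    · rw [if_pos ⟨h, trivial⟩, if_pos ⟨by omega, by omega⟩]
    · rw [if_neg (by tauto), if_neg (by omega)]
  · -- days ≤ 0 : A's range is empty, B's n is 0
    unfold calculate_christmas_expenses
    rw [show PySem.List.pyRange 1 (days + 1) = [] from by simp [PySem.List.pyRange]; omega]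
    unfold calculate_christmas_expenses_alt
    rw [show (if days > 0 then days else 0) = (0 : Int) from by split_ifs <;> omega]
    simp only [List.foldl]
    have hz : pv_floorsum 0 2 = 0 ∧ pv_floorsum 0 3 = 0 ∧ pv_floorsum 0 5 = 0 := by
      refine ⟨?_, ?_, ?_⟩ <;> decide
    rw [hz.1, hz.2.1, hz.2.2]
    norm_num [PySem.Int.floordiv]
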